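-- pv_equiv track=rewrite | github.com/cparmet/finite-news | tasks/editing.py | apply_one_headline_keyword_filter
-- ===== SOURCE A (Python) =====
-- def apply_one_headline_keyword_filter(headlines, keyword):
--     """Limit the issue to a maximum of one headline that mentions this keyword.
--
--     ARGUMENTS
--     headlines (list of str): Headlines from all sources
--
--     RETURNS
--     List of headlines except those that contain this keyword
--     """
--
--     new_headlines = []
--     kw_counter = 0
--     keyword = keyword.lower()
--     for headline in headlines:
--         # TODO: Could add spaCy tokenizer, split on spaces, punctuation. But the benefit would be teeny. Empirically this has been working perfectly for months.
--         has_kw = keyword in headline.lower()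
--         kw_counter += has_kw
--         if not has_kw or kw_counter <= 1:
--             new_headlines.append(headline)
--     return new_headlines
-- ===== SOURCE B (Python) =====
-- def apply_one_headline_keyword_filter(headlines, keyword):
--     """Limit the issue to a maximum of one headline that mentions this keyword.
--
--     Two-phase: first collect the indices of matching headlines, then keep each
--     headline iff it has no match or it is the first (lowest-index) match.
--     """
--     kw = keyword.lower()
--     match_indices = [i for i, h in enumerate(headlines) if kw in h.lower()]
--     first = match_indices[0] if match_indices else None
--     return [h for i, h in enumerate(headlines) if kw not in h.lower() or i == first]
-- ===== Notes on version B (the rewrite author's own statement) =====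
-- stated objective: alternative
-- what changed: Replaces A's single incremental counter-scan with a two-phase index structure: a first pass collects the indices of matching headlines, then a filter keeps a headline iff it has no match or its index is the first match index.
import Mathlib
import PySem

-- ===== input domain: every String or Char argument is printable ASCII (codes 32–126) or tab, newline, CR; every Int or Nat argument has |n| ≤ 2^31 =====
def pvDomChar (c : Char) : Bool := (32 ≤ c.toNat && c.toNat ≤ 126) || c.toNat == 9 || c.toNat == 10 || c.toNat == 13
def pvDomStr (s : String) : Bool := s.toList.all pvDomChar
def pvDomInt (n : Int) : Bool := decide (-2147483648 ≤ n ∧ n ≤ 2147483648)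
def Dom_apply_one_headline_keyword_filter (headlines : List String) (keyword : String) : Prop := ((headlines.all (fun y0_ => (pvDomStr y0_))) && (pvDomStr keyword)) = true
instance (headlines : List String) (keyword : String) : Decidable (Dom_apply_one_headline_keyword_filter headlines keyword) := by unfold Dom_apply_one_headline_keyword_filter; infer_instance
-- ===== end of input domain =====

-- B replaces A's incremental counter-scan by a two-phase structure (collect match
-- indices, then filter by first match index); alternative decomposition, same cost.


-- ===== PORT A =====
def apply_one_headline_keyword_filter (headlines : List String) (keyword : String) : List String :=
  let keyword := PySem.Str.lower keyword
  (headlines.foldl (fun (st : List String × Int) headline =>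
      let has_kw := PySem.Str.isIn keyword (PySem.Str.lower headline)
      let kw_counter := st.2 + (if has_kw then 1 else 0)
      if !has_kw || kw_counter ≤ 1 then (st.1 ++ [headline], kw_counter)
      else (st.1, kw_counter)
    ) ([], 0)).1

-- ===== PORT B =====
def apply_one_headline_keyword_filter_alt (headlines : List String) (keyword : String) : List String :=
  let kw := PySem.Str.lower keyword
  let match_indices :=
    ((PySem.List.enumerate headlines).filter
      (fun p => PySem.Str.isIn kw (PySem.Str.lower p.2))).map (·.1)
  let first := match_indices.head?
  ((PySem.List.enumerate headlines).filter
      (fun p => !PySem.Str.isIn kw (PySem.Str.lower p.2) || first == some p.1)).map (·.2)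

-- ===== PRECONDITION & SPEC =====
def Spec_apply_one_headline_keyword_filter (headlines : List String) (keyword : String) (out : List String) : Prop := out = apply_one_headline_keyword_filter_alt headlines keyword
instance (headlines : List String) (keyword : String) (out : List String) : Decidable (Spec_apply_one_headline_keyword_filter headlines keyword out) := by unfold Spec_apply_one_headline_keyword_filter; infer_instance

-- ===== CLAIM (what is proved, stated in full; the proofs are below) =====
def Claim_equal_apply_one_headline_keyword_filter : Prop := ∀ (headlines : List String) (keyword : String), Dom_apply_one_headline_keyword_filter headlines keyword → Spec_apply_one_headline_keyword_filter headlines keyword (apply_one_headline_keyword_filter headlines keyword)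

-- ===== LEMMAS AND PROOFS =====

/-- 'keep the first match, drop later matches, keep all non-matches' — the common
characterisation both ports are reduced to. -/
def pvKeepFirst (m : String → Bool) : List String → List String
  | [] => []
  | h :: t => if m h then h :: t.filter (fun x => !m x) else h :: pvKeepFirst m t

/-- A's loop body, as a named function (definitionally equal to the lambda in the port). -/
def pvStepA (m : String → Bool) (st : List String × Int) (headline : String) : List String × Int :=
  let has_kw := m headline
  let kw_counter := st.2 + (if has_kw then 1 else 0)
  if !has_kw || kw_counter ≤ 1 then (st.1 ++ [headline], kw_counter) else (st.1, kw_counter)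

/-- A-side loop invariant. -/
theorem pvFoldA (m : String → Bool) (hs : List String) (acc : List String) (c : Int)
    (hc : 0 ≤ c) :
    (hs.foldl (pvStepA m) (acc, c)).1
      = acc ++ (if 1 ≤ c then hs.filter (fun x => !m x) else pvKeepFirst m hs) := by
  induction hs generalizing acc c with
  | nil => by_cases h1 : 1 ≤ c <;> simp [h1, pvKeepFirst]
  | cons h t ih =>
    rw [List.foldl_cons]
    by_cases hm : m h
    · by_cases h1 : 1 ≤ c
      · have hstep : pvStepA m (acc, c) h = (acc, c + 1) := by
          simp [pvStepA, hm, show ¬ (c + 1 ≤ 1) by omega]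
        rw [hstep, ih acc (c + 1) (by omega)]
        simp [h1, hm, show (1:Int) ≤ c + 1 by omega]
      · have hc0 : c = 0 := by omega
        subst hc0
        have hstep : pvStepA m (acc, 0) h = (acc ++ [h], 1) := by
          simp [pvStepA, hm]
        rw [hstep, ih (acc ++ [h]) 1 (by omega)]
        simp [hm, pvKeepFirst, List.append_assoc]
    · have hstep : pvStepA m (acc, c) h = (acc ++ [h], c) := by
        simp [pvStepA, hm]
      rw [hstep, ih (acc ++ [h]) c hc]
      by_cases h1 : 1 ≤ c <;>
        simp [h1, hm, pvKeepFirst, List.append_assoc]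

/-- Filtering an enumerated list on a predicate of the element only. -/
theorem pvFilterSnd (m : String → Bool) (t : List String) (s : Int) :
    ((PySem.List.enumerate t s).filter (fun p => !m p.2)).map (·.2)
      = t.filter (fun x => !m x) := by
  induction t generalizing s with
  | nil => simp [PySem.List.enumerate_nil]
  | cons h t ih =>
    rw [PySem.List.enumerate_cons, List.filter_cons, List.filter_cons]
    by_cases hm : m h <;> simp [hm, ih]

/-- B-side: the filter keyed on the head of the match-index list computes
`pvKeepFirst`; generalised over the enumeration start. -/
theorem pvFoldB (m : String → Bool) (hs : List String) (s : Int) :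
    ((PySem.List.enumerate hs s).filter
        (fun p => !m p.2 ||
          (((PySem.List.enumerate hs s).filter (fun q => m q.2)).map (·.1)).head? == some p.1)).map (·.2)
      = pvKeepFirst m hs := by
  induction hs generalizing s with
  | nil => simp [PySem.List.enumerate_nil, pvKeepFirst]
  | cons h t ih =>
    rw [PySem.List.enumerate_cons]
    by_cases hm : m h
    · -- first = some s; tail indices are all ≥ s + 1, hence ≠ s
      have hfirst :
          ((((s, h) :: PySem.List.enumerate t (s + 1)).filter (fun q => m q.2)).map (·.1)).head?
            = some s := by
        rw [List.filter_cons]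
        simp [hm]
      rw [List.filter_cons, hfirst]
      have hhead : (!m (s, h).2 || ((some s : Option Int) == some (s, h).1)) = true := by
        simp
      rw [if_pos hhead]
      have htail : ((PySem.List.enumerate t (s + 1)).filter
          (fun p => !m p.2 || ((some s : Option Int) == some p.1))).map (·.2)
          = t.filter (fun x => !m x) := by
        rw [← pvFilterSnd m t (s + 1)]
        congr 1
        apply List.filter_congr
        intro p hp
        rcases (PySem.List.mem_enumerate_iff t (s + 1) p).1 hp with ⟨k, hk, hpe⟩
        subst hpe
        have : ¬ (s = s + 1 + (k : Int)) := by omega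
        simp [this]
      simp only [List.map_cons, htail]
      simp [pvKeepFirst, hm]
    · -- head is kept; the first match index is the tail's first match index
      have hfirst :
          (((s, h) :: PySem.List.enumerate t (s + 1)).filter (fun q => m q.2))
            = (PySem.List.enumerate t (s + 1)).filter (fun q => m q.2) := by
        rw [List.filter_cons]
        simp [hm]
      rw [List.filter_cons, hfirst]
      have hhead : (!m (s, h).2 ||
          ((((PySem.List.enumerate t (s + 1)).filter (fun q => m q.2)).map (·.1)).head?
            == some (s, h).1)) = true := by
        simp [hm]
      rw [if_pos hhead, List.map_cons, ih (s + 1)]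
      simp [pvKeepFirst, hm]

-- ===== VERDICT (by name: the statement is the Claim_ definition above) =====
theorem apply_one_headline_keyword_filter_spec : Claim_equal_apply_one_headline_keyword_filter := by
  intro headlines keyword _
  unfold Spec_apply_one_headline_keyword_filter
  show (headlines.foldl
      (pvStepA (fun h => PySem.Str.isIn (PySem.Str.lower keyword) (PySem.Str.lower h)))
      ([], 0)).1 = apply_one_headline_keyword_filter_alt headlines keyword
  rw [pvFoldA _ headlines [] 0 (le_refl 0)]
  unfold apply_one_headline_keyword_filter_alt
  rw [pvFoldB (fun h => PySem.Str.isIn (PySem.Str.lower keyword) (PySem.Str.lower h)) headlines 0]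
  simp
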